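-- pv_equiv track=rewrite | github.com/jjross77/The-Free-Legal-Innovation-Project-and-Raise-You-Up | FLIP/pipe_line_to_process_documents6.py | spliting_upload_into_single_cases_before_pos_FIRAC_FAST
-- ===== SOURCE A (Python) =====
-- def spliting_upload_into_single_cases_before_pos_FIRAC_FAST(doc_list):
--     """ preprocessing_upload for transform_to_pos"""
--     dic_of_cases={}
--     docs_to_delete=[]
--     for sentence in doc_list:
--         doc_name=sentence[4]
--         if dic_of_cases.get(doc_name):
--                 dic_of_cases[doc_name].append([sentence[0], sentence[1], sentence[2],sentence[3],sentence[4]])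
--                 continue
--
--         dic_of_cases[doc_name]=[[sentence[0], sentence[1], sentence[2],sentence[3],sentence[4]]]
--
--
--     for doc_name, sentences_list in dic_of_cases.items():
--         if len(sentences_list)<5:
--             docs_to_delete.append(doc_name)
--     for deltes in docs_to_delete:
--         del dic_of_cases[deltes]
--     return dic_of_cases,docs_to_delete
-- ===== SOURCE B (Python) =====
-- def spliting_upload_into_single_cases_before_pos_FIRAC_FAST(doc_list):
--     """preprocessing_upload for transform_to_pos (two-pass: count first, build only kept groups)"""
--     counts = {}
--     for sentence in doc_list:
--         counts[sentence[4]] = counts.get(sentence[4], 0) + 1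
--     docs_to_delete = [name for name, c in counts.items() if c < 5]
--     dic_of_cases = {}
--     for sentence in doc_list:
--         if counts[sentence[4]] >= 5:
--             dic_of_cases.setdefault(sentence[4], []).append(sentence[:5])
--     return dic_of_cases, docs_to_delete
-- ===== Notes on version B (the rewrite author's own statement) =====
-- stated objective: alternative
-- what changed: B counts occurrences of each doc_name in a first pass, derives docs_to_delete from the counts, and in a second pass builds only the kept groups (setdefault/append with sentence[:5]), instead of A's build-all-groups then collect-and-delete-small-groups three-loop scheme.
import Mathlib
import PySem

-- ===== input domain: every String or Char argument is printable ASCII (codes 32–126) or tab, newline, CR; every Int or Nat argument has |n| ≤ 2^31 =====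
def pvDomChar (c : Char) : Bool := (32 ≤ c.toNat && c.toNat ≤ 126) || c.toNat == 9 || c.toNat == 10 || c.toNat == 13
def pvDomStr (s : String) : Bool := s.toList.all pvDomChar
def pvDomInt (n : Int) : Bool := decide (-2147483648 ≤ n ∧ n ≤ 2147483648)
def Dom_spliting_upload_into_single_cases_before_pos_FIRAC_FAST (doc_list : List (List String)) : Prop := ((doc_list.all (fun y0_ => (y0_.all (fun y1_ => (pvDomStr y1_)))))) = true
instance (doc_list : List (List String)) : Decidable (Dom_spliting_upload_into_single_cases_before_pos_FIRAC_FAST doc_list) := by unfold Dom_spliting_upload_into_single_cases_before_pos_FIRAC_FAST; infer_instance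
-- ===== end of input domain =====

-- B replaces A's build-everything-then-delete group-by with a count-first two-pass that never builds the small groups
-- (objective: alternative decomposition, same asymptotic cost).

-- ===== PORT A =====
-- sentence[4] (shared transliteration of the key expression; default "" is only reached outside Pre_)
def pvKey (sentence : List String) : String := (PySem.List.pyGet? sentence 4).getD ""

-- [sentence[0], sentence[1], sentence[2], sentence[3], sentence[4]]
def pvProjA (sentence : List String) : List String :=
  [(PySem.List.pyGet? sentence 0).getD "", (PySem.List.pyGet? sentence 1).getD "",
   (PySem.List.pyGet? sentence 2).getD "", (PySem.List.pyGet? sentence 3).getD "",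
   (PySem.List.pyGet? sentence 4).getD ""]

def spliting_upload_into_single_cases_before_pos_FIRAC_FAST (doc_list : List (List String)) : (List (String × List (List String))) × List String :=
  -- first loop: group-by doc_name (dict.get truthiness: a present empty list would be overwritten)
  let dic_of_cases : PySem.Dict String (List (List String)) :=
    doc_list.foldl (fun d sentence =>
      let doc_name := pvKey sentence
      match d.get? doc_name with
      | some w => if w.isEmpty then d.insert doc_name [pvProjA sentence]
                  else d.insert doc_name (w ++ [pvProjA sentence])
      | none => d.insert doc_name [pvProjA sentence]) PySem.Dict.empty
  -- second loop: collect names of small groups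
  let docs_to_delete : List String :=
    dic_of_cases.items.foldl (fun acc p => if p.2.length < 5 then acc ++ [p.1] else acc) []
  -- third loop: delete them
  let dic2 := docs_to_delete.foldl (fun d k => d.erase k) dic_of_cases
  (dic2.items, docs_to_delete)

-- ===== PORT B =====
def spliting_upload_into_single_cases_before_pos_FIRAC_FAST_alt (doc_list : List (List String)) : (List (String × List (List String))) × List String :=
  -- first pass: counts[sentence[4]] = counts.get(sentence[4], 0) + 1
  let counts : PySem.Dict String Int :=
    doc_list.foldl (fun d sentence =>
      d.insert (pvKey sentence) (d.getD (pvKey sentence) 0 + 1)) PySem.Dict.empty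
  -- comprehension: [name for name, c in counts.items() if c < 5]
  let docs_to_delete : List String := (counts.items.filter (fun p => p.2 < 5)).map (·.1)
  -- second pass: only sentences of big-enough docs; setdefault(...,[]).append(sentence[:5]) = modify
  let dic_of_cases : PySem.Dict String (List (List String)) :=
    doc_list.foldl (fun d sentence =>
      if 5 ≤ counts.getD (pvKey sentence) 0 then
        d.modify (pvKey sentence) [] (· ++ [PySem.List.slice sentence none (some 5)])
      else d) PySem.Dict.empty
  (dic_of_cases.items, docs_to_delete)

-- ===== PRECONDITION & SPEC =====
-- Pre_ excludes exactly the inputs where Python A raises IndexError: a sentence with fewer than 5 fields.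
def Pre_spliting_upload_into_single_cases_before_pos_FIRAC_FAST (doc_list : List (List String)) : Prop :=
  ∀ s ∈ doc_list, 5 ≤ s.length
instance (doc_list : List (List String)) : Decidable (Pre_spliting_upload_into_single_cases_before_pos_FIRAC_FAST doc_list) := by unfold Pre_spliting_upload_into_single_cases_before_pos_FIRAC_FAST; infer_instance

def pvWitness_spliting_upload_into_single_cases_before_pos_FIRAC_FAST : List (List String) :=
  [["a","b","c","d","x"], ["a","b","c","d","x"], ["a","b","c","d","x"],
   ["a","b","c","d","x"], ["a","b","c","d","x"], ["e","f","g","h","y"]]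

def Spec_spliting_upload_into_single_cases_before_pos_FIRAC_FAST (doc_list : List (List String)) (out : (List (String × List (List String))) × List String) : Prop := out = spliting_upload_into_single_cases_before_pos_FIRAC_FAST_alt doc_list
instance (doc_list : List (List String)) (out : (List (String × List (List String))) × List String) : Decidable (Spec_spliting_upload_into_single_cases_before_pos_FIRAC_FAST doc_list out) := by unfold Spec_spliting_upload_into_single_cases_before_pos_FIRAC_FAST; infer_instance

-- ===== CLAIM (what is proved, stated in full; the proofs are below) =====
def Claim_equal_spliting_upload_into_single_cases_before_pos_FIRAC_FAST : Prop := ∀ (doc_list : List (List String)), Dom_spliting_upload_into_single_cases_before_pos_FIRAC_FAST doc_list → Pre_spliting_upload_into_single_cases_before_pos_FIRAC_FAST doc_list → Spec_spliting_upload_into_single_cases_before_pos_FIRAC_FAST doc_list (spliting_upload_into_single_cases_before_pos_FIRAC_FAST doc_list)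

-- ===== LEMMAS AND PROOFS =====

-- the common canonical form both ports are reduced to
def pvCanon (doc_list : List (List String)) : (List (String × List (List String))) × List String :=
  let names := doc_list.map pvKey
  let keep : String → Bool := fun n => decide ((5:Int) ≤ (names.count n : Int))
  (((PySem.Set.ofList names).filter keep).map
     (fun n => (n, (doc_list.filter (fun s => pvKey s == n)).map pvProjA)),
   (PySem.Set.ofList names).filter (fun n => !(keep n)))

-- sentence[:5] = the five explicit fields, once the sentence has ≥ 5 fields
theorem pv_slice_eq_proj (s : List String) (h : 5 ≤ s.length) :
    PySem.List.slice s none (some 5) = pvProjA s := by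
  match s, h with
  | a::b::c::d::e::t, _ =>
    have h0 : (0:Int) ≤ (t.length:Int) + 1 + 1 + 1 + 1 := by omega
    have h2 : (2:Int) ≤ (t.length:Int) + 1 + 1 + 1 + 1 := by omega
    have h3 : (3:Int) ≤ (t.length:Int) + 1 + 1 + 1 + 1 := by omega
    have h4 : (4:Int) ≤ (t.length:Int) + 1 + 1 + 1 + 1 := by omega
    have h1 : (0:Int) ≤ (t.length:Int) + 1 + 1 + 1 := by omega
    simp [PySem.List.slice, PySem.List.clampIdx, pvProjA, PySem.List.pyGet?, PySem.List.pyIdx?,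
      h0, h1, h2, h3, h4]

-- ordered dedup commutes with filter
theorem pv_ofList_filter {α : Type} [BEq α] [LawfulBEq α] (p : α → Bool) (l : List α) :
    PySem.Set.ofList (l.filter p) = (PySem.Set.ofList l).filter p := by
  have key : ∀ (l : List α) (acc : PySem.Set α),
      (l.filter p).foldl PySem.Set.add (acc.filter p) = (l.foldl PySem.Set.add acc).filter p := by
    intro l
    induction l with
    | nil => intro acc; simp
    | cons x t ih =>
      intro acc
      have step : List.filter p (PySem.Set.add acc x) =
          if p x then PySem.Set.add (acc.filter p) x else acc.filter p := by
        by_cases hmem : x ∈ acc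
        · have hmf : x ∈ acc.filter p ↔ p x := by
            constructor
            · intro hc; exact (List.mem_filter.mp hc).2
            · intro hp; exact List.mem_filter.mpr ⟨hmem, hp⟩
          by_cases hx : p x = true
          · simp [PySem.Set.add, PySem.Set.contains, hmem, hx, hmf.mpr hx]
          · simp [PySem.Set.add, PySem.Set.contains, hmem, hx]
        · have hnm : ¬ x ∈ acc.filter p := fun hc => hmem (List.mem_filter.mp hc).1
          by_cases hx : p x = true
          · simp [PySem.Set.add, PySem.Set.contains, hmem, hnm, List.filter_append, hx]
          · simp [PySem.Set.add, PySem.Set.contains, hmem, List.filter_append, hx]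
      by_cases hx : p x = true
      · rw [List.filter_cons_of_pos hx, List.foldl_cons, List.foldl_cons,
          ← ih (PySem.Set.add acc x), step, if_pos hx]
      · rw [List.filter_cons_of_neg (by simpa using hx), List.foldl_cons,
          ← ih (PySem.Set.add acc x), step, if_neg hx]
  simpa [PySem.Set.ofList, PySem.Set.empty] using key l []

-- A's third loop: deleting a list of keys filters the items
theorem pv_eraseAll_items {ν : Type} (ks : List String) (d : PySem.Dict String ν) :
    (ks.foldl (fun d k => d.erase k) d).items = d.items.filter (fun p => !(ks.contains p.1)) := by
  induction ks generalizing d with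
  | nil => simp
  | cons k t ih =>
    rw [List.foldl_cons, ih, PySem.Dict.erase, List.filter_filter]
    apply List.filter_congr
    intro p _
    by_cases hk : p.1 = k <;> simp [hk]

-- A's first loop's step equals a plain modify once every stored group is nonempty
theorem pv_foldA_eq_modify : ∀ (l : List (List String)) (d : PySem.Dict String (List (List String))),
    (∀ v ∈ d.values, v ≠ []) →
    l.foldl (fun d sentence =>
      let doc_name := pvKey sentence
      match d.get? doc_name with
      | some w => if w.isEmpty then d.insert doc_name [pvProjA sentence]
                  else d.insert doc_name (w ++ [pvProjA sentence])
      | none => d.insert doc_name [pvProjA sentence]) d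
    = l.foldl (fun d s => d.modify (pvKey s) [] (· ++ [pvProjA s])) d := by
  intro l
  induction l with
  | nil => intro d _; rfl
  | cons s t ih =>
    intro d hinv
    rw [List.foldl_cons, List.foldl_cons]
    have hstep : (match d.get? (pvKey s) with
        | some w => if w.isEmpty then d.insert (pvKey s) [pvProjA s]
                    else d.insert (pvKey s) (w ++ [pvProjA s])
        | none => d.insert (pvKey s) [pvProjA s])
        = d.modify (pvKey s) [] (· ++ [pvProjA s]) := by
      cases hg : d.get? (pvKey s) with
      | none =>
        simp [PySem.Dict.modify, PySem.Dict.getD_of_get?_eq_none _ _ hg]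
      | some w =>
        have hw : w ≠ [] := by
          apply hinv
          have := PySem.Dict.mem_items_of_get?_eq_some d hg
          exact List.mem_map_of_mem this
        simp [List.isEmpty_iff, hw, PySem.Dict.modify, PySem.Dict.getD_of_get?_eq_some _ _ hg]
    rw [hstep]
    apply ih
    intro v hv
    rcases PySem.Dict.mem_values_insert d _ _ _ hv with h | h
    · subst h; simp
    · exact hinv v h

-- characterization of the modify-group-by fold
theorem pv_group_getD (l : List (List String)) (n : String) :
    (l.foldl (fun d s => d.modify (pvKey s) [] (· ++ [pvProjA s])) PySem.Dict.empty).getD n []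
    = (l.filter (fun s => pvKey s == n)).map pvProjA := by
  have h := PySem.Dict.getD_foldl_modify_append (l.map (fun s => (pvKey s, pvProjA s)))
    PySem.Dict.empty n
  rw [List.foldl_map] at h
  simpa [List.filter_map, Function.comp] using h

theorem pv_group_keys (l : List (List String)) :
    (l.foldl (fun d s => d.modify (pvKey s) [] (· ++ [pvProjA s])) PySem.Dict.empty).keys
    = PySem.Set.ofList (l.map pvKey) := by
  rw [PySem.Dict.keys_foldl_modify_key l pvKey [] (fun _ s => (· ++ [pvProjA s]))]
  rfl

theorem pv_group_items (l : List (List String)) :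
    (l.foldl (fun d s => d.modify (pvKey s) [] (· ++ [pvProjA s])) PySem.Dict.empty).items
    = (PySem.Set.ofList (l.map pvKey)).map
        (fun n => (n, (l.filter (fun s => pvKey s == n)).map pvProjA)) := by
  have hnd : (l.foldl (fun d s => d.modify (pvKey s) [] (· ++ [pvProjA s])) PySem.Dict.empty).keys.Nodup := by
    apply PySem.Dict.nodup_keys_foldl_modify_key l pvKey [] (fun _ s => (· ++ [pvProjA s]))
    simp
  rw [PySem.Dict.items_eq_map_keys _ hnd [], pv_group_keys]
  exact List.map_congr_left (fun n _ => by rw [pv_group_getD])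

-- the length of a group is the count of its name
theorem pv_grp_length (doc_list : List (List String)) (n : String) :
    ((doc_list.filter (fun s => pvKey s == n)).map pvProjA).length
    = (doc_list.map pvKey).count n := by
  rw [List.length_map, ← List.countP_eq_length_filter, List.count_eq_countP, List.countP_map]
  rfl

-- A's second loop collects exactly the names with count < 5
theorem pv_del_eq (l : List (List String)) :
    ((l.foldl (fun d s => d.modify (pvKey s) [] (· ++ [pvProjA s])) PySem.Dict.empty).items.foldl
        (fun acc p => if p.2.length < 5 then acc ++ [p.1] else acc) [])
    = (PySem.Set.ofList (l.map pvKey)).filter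
        (fun n => !(decide ((5:Int) ≤ ((l.map pvKey).count n : Int)))) := by
  rw [pv_group_items,
    PySem.List.foldl_append_ite (p := fun p : String × List (List String) => p.2.length < 5)
      (f := fun p => p.1)]
  simp only [List.filter_map, List.map_map, Function.comp_def, List.nil_append, List.map_id']
  apply List.filter_congr
  intro n _
  rw [pv_grp_length, ← decide_not]
  exact decide_eq_decide.mpr (by omega)

theorem pv_A_eq_canon (doc_list : List (List String))
    (_ : Pre_spliting_upload_into_single_cases_before_pos_FIRAC_FAST doc_list) :
    spliting_upload_into_single_cases_before_pos_FIRAC_FAST doc_list = pvCanon doc_list := by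
  have hempty : ∀ v ∈ (PySem.Dict.empty : PySem.Dict String (List (List String))).values, v ≠ [] := by
    intro v hv
    simp [PySem.Dict.empty, PySem.Dict.values] at hv
  simp only [spliting_upload_into_single_cases_before_pos_FIRAC_FAST, pvCanon]
  rw [pv_foldA_eq_modify doc_list PySem.Dict.empty hempty, pv_del_eq, pv_eraseAll_items,
    pv_group_items]
  refine congrArg₂ Prod.mk ?_ rfl
  simp only [List.filter_map, Function.comp_def]
  apply congrArg
  apply List.filter_congr
  intro n hn
  rw [List.contains_eq_mem]
  by_cases hk : ((5:Int) ≤ ((doc_list.map pvKey).count n : Int))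
  · have : n ∉ (PySem.Set.ofList (doc_list.map pvKey)).filter
        (fun n => !(decide ((5:Int) ≤ ((doc_list.map pvKey).count n : Int)))) := by
      intro hc
      have := (List.mem_filter.mp hc).2
      simp [hk] at this
    rw [decide_eq_false this]
    simp [hk]
  · have : n ∈ (PySem.Set.ofList (doc_list.map pvKey)).filter
        (fun n => !(decide ((5:Int) ≤ ((doc_list.map pvKey).count n : Int)))) :=
      List.mem_filter.mpr ⟨hn, by simp [hk]⟩
    rw [decide_eq_true this]
    simp [hk]

theorem pv_B_eq_canon (doc_list : List (List String))
    (hpre : Pre_spliting_upload_into_single_cases_before_pos_FIRAC_FAST doc_list) :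
    spliting_upload_into_single_cases_before_pos_FIRAC_FAST_alt doc_list = pvCanon doc_list := by
  have hcounter : doc_list.foldl (fun d s => d.insert (pvKey s) (d.getD (pvKey s) 0 + 1)) PySem.Dict.empty
      = PySem.Dict.counter (doc_list.map pvKey) := by
    rw [← PySem.Dict.foldl_insert_getD_add_one_eq_counter, List.foldl_map]
  simp only [spliting_upload_into_single_cases_before_pos_FIRAC_FAST_alt, pvCanon, hcounter]
  refine congrArg₂ Prod.mk ?_ ?_
  · -- the kept dict
    simp only [PySem.Dict.getD_counter]
    rw [PySem.List.foldl_ite_eq_foldl_filter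
      (p := fun s => (5:Int) ≤ ((doc_list.map pvKey).count (pvKey s) : Int))
      (f := fun (d : PySem.Dict String (List (List String))) s => d.modify (pvKey s) [] (· ++ [PySem.List.slice s none (some 5)]))]
    rw [PySem.List.foldl_congr_mem _ _
      (fun d s => d.modify (pvKey s) [] (· ++ [pvProjA s])) _
      (fun d s hs => by
        rw [pv_slice_eq_proj s (hpre s (List.mem_of_mem_filter hs))])]
    rw [pv_group_items]
    have h5 : (doc_list.filter
          (fun s => decide ((5:Int) ≤ ((doc_list.map pvKey).count (pvKey s) : Int)))).map pvKey
        = (doc_list.map pvKey).filter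
          (fun n => decide ((5:Int) ≤ ((doc_list.map pvKey).count n : Int))) := by
      rw [List.filter_map]
      rfl
    rw [h5, pv_ofList_filter]
    apply List.map_congr_left
    intro n hn
    have hkeep : decide ((5:Int) ≤ ((doc_list.map pvKey).count n : Int)) = true :=
      (List.mem_filter.mp hn).2
    refine congrArg _ ?_
    apply congrArg
    rw [List.filter_filter]
    apply List.filter_congr
    intro s _
    by_cases h : pvKey s = n
    · rw [h, hkeep]
      simp
    · have : (pvKey s == n) = false := by simpa using h
      simp [this]
  · -- docs_to_delete
    rw [PySem.Dict.items_counter]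
    simp only [List.filter_map, List.map_map, Function.comp_def, List.map_id']
    apply List.filter_congr
    intro n _
    rw [← decide_not]
    exact decide_eq_decide.mpr (by omega)

-- ===== VERDICT (by name: the statement is the Claim_ definition above) =====
theorem spliting_upload_into_single_cases_before_pos_FIRAC_FAST_spec : Claim_equal_spliting_upload_into_single_cases_before_pos_FIRAC_FAST := by
  intro doc_list _ hpre
  show _ = _
  rw [pv_A_eq_canon doc_list hpre, pv_B_eq_canon doc_list hpre]
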